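-- pv_equiv track=rewrite | github.com/divK34/divyani_FBS_work | assignments/python/A8/T4.py | various_sum
-- ===== SOURCE A (Python) =====
-- def various_sum(n):
--     a = 0
--     b = 0
--     c = 0
--     for i in range(1,n+1):
--         a += i
--         c += i**i
--         fact = i
--         for j in range(1,i):
--             fact *= j
--         b += fact
--
--     return n, a, b, c
-- ===== SOURCE B (Python) =====
-- def various_sum(n):
--     m = n if n > 0 else 0
--     a = m * (m + 1) // 2
--     b = 0
--     c = 0
--     fact = 1
--     for i in range(1, n + 1):
--         fact *= i
--         b += fact
--         c += i**i
--     return n, a, b, c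
-- ===== Notes on version B (the rewrite author's own statement) =====
-- stated objective: alternative
-- what changed: B computes a by the triangular-number closed form instead of accumulation and keeps one running factorial updated per iteration instead of A's inner loop that rebuilds each factorial from scratch, leaving a single flat loop; intended as faster (O(n) vs O(n^2) multiplications; measured about 10x at the largest size both finished, unconfirmed beyond since both time out on the huge i**i values).
import Mathlib
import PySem

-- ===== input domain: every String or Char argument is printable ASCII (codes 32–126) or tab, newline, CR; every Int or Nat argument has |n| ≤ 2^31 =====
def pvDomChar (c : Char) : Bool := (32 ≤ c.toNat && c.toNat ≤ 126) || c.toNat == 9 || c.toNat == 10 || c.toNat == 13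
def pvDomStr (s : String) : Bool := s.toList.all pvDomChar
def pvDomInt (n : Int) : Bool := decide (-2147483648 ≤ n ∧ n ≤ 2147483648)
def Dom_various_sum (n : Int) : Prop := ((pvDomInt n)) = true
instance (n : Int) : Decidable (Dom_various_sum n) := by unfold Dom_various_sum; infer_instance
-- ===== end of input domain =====

-- B replaces A's nested-loop-for-everything by a closed-form triangular number for a and a
-- single loop with a running factorial for b (no inner loop, a single flat loop instead of nested loops).

-- ===== PORT A =====
-- loop body of A: a += i; c += i**i; fact = i; for j in range(1,i): fact *= j; b += fact
-- (i**i ported by hand as i ^ i.toNat — exact since the loop only sees i ≥ 1)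
def stepA (st : Int × Int × Int) (i : Int) : Int × Int × Int :=
  let a := st.1 + i
  let c := st.2.2 + i ^ i.toNat
  let fact := (PySem.List.pyRange 1 i 1).foldl (fun f j => f * j) i
  let b := st.2.1 + fact
  (a, b, c)

def various_sum (n : Int) : List Int :=
  let st := (PySem.List.pyRange 1 (n + 1) 1).foldl stepA (0, 0, 0)
  [n, st.1, st.2.1, st.2.2]

-- ===== PORT B =====
-- loop body of B: fact *= i; b += fact; c += i**i   (state = (fact, b, c))
def stepB (st : Int × Int × Int) (i : Int) : Int × Int × Int :=
  let fact := st.1 * i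
  let b := st.2.1 + fact
  let c := st.2.2 + i ^ i.toNat
  (fact, b, c)

def various_sum_alt (n : Int) : List Int :=
  let m : Int := if n > 0 then n else 0
  let a := PySem.Int.floordiv (m * (m + 1)) 2
  let st := (PySem.List.pyRange 1 (n + 1) 1).foldl stepB (1, 0, 0)
  [n, a, st.2.1, st.2.2]

-- ===== PRECONDITION & SPEC =====
def Spec_various_sum (n : Int) (out : List Int) : Prop := out = various_sum_alt n
instance (n : Int) (out : List Int) : Decidable (Spec_various_sum n out) := by unfold Spec_various_sum; infer_instance

-- ===== CLAIM (what is proved, stated in full; the proofs are below) =====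
def Claim_equal_various_sum : Prop := ∀ (n : Int), Dom_various_sum n → Spec_various_sum n (various_sum n)

-- ===== LEMMAS AND PROOFS =====

-- A's inner factorial loop: folding * over range(1, k+1) multiplies init by k!.
lemma innerFact (k : Nat) (init : Int) :
    (PySem.List.pyRange 1 ((k : Int) + 1) 1).foldl (fun f j => f * j) init
      = init * (Nat.factorial k : Int) := by
  induction k generalizing init with
  | zero =>
      rw [PySem.List.pyRange_one_eq_nil (by norm_num)]
      simp [Nat.factorial]
  | succ k ih =>
      have h : ((k + 1 : Nat) : Int) + 1 = ((k : Int) + 1) + 1 := by push_cast; ring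
      rw [h, PySem.List.pyRange_one_succ_right (by omega)]
      rw [List.foldl_append, ih]
      simp only [List.foldl_cons, List.foldl_nil, Nat.factorial_succ]
      push_cast
      ring

-- joint loop invariant: A's accumulator vs B's accumulator over range(1, m+1)
lemma main_inv (m : Nat) :
    (((PySem.List.pyRange 1 ((m : Int) + 1) 1).foldl stepA (0, 0, 0)).1 * 2
        = (m : Int) * ((m : Int) + 1))
    ∧ ((PySem.List.pyRange 1 ((m : Int) + 1) 1).foldl stepB (1, 0, 0)).1
        = (Nat.factorial m : Int)
    ∧ ((PySem.List.pyRange 1 ((m : Int) + 1) 1).foldl stepA (0, 0, 0)).2.1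
        = ((PySem.List.pyRange 1 ((m : Int) + 1) 1).foldl stepB (1, 0, 0)).2.1
    ∧ ((PySem.List.pyRange 1 ((m : Int) + 1) 1).foldl stepA (0, 0, 0)).2.2
        = ((PySem.List.pyRange 1 ((m : Int) + 1) 1).foldl stepB (1, 0, 0)).2.2 := by
  induction m with
  | zero =>
      rw [PySem.List.pyRange_one_eq_nil (by norm_num)]
      simp [Nat.factorial]
  | succ m ih =>
      obtain ⟨ha, hf, hb, hc⟩ := ih
      have h : ((m + 1 : Nat) : Int) + 1 = ((m : Int) + 1) + 1 := by push_cast; ring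
      rw [h, PySem.List.pyRange_one_succ_right (by omega)]
      rw [List.foldl_append, List.foldl_append]
      simp only [List.foldl_cons, List.foldl_nil, stepA, stepB]
      have hinner := innerFact m ((m : Int) + 1)
      refine ⟨?_, ?_, ?_, ?_⟩
      · push_cast; nlinarith [ha]
      · rw [hf, Nat.factorial_succ]; push_cast; ring
      · rw [hinner, hb, hf]; ring
      · rw [hc]

theorem various_sum_agree (n : Int) : various_sum n = various_sum_alt n := by
  by_cases hn : 0 < n
  · obtain ⟨m, hm⟩ : ∃ m : Nat, n = (m : Int) := ⟨n.toNat, (Int.toNat_of_nonneg hn.le).symm⟩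
    subst hm
    obtain ⟨ha, hf, hb, hc⟩ := main_inv m
    unfold various_sum various_sum_alt
    simp only [if_pos hn]
    rw [hb, hc]
    have h2 : PySem.Int.floordiv ((m : Int) * ((m : Int) + 1)) 2
        = ((PySem.List.pyRange 1 ((m : Int) + 1) 1).foldl stepA (0, 0, 0)).1 := by
      rw [PySem.Int.floordiv_eq_ediv_of_pos (by norm_num), ← ha]
      omega
    rw [h2]
  · unfold various_sum various_sum_alt
    rw [PySem.List.pyRange_one_eq_nil (by omega)]
    simp only [if_neg hn, List.foldl_nil]
    norm_num [PySem.Int.floordiv_eq_ediv_of_pos]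

-- ===== VERDICT (by name: the statement is the Claim_ definition above) =====
theorem various_sum_spec : Claim_equal_various_sum := by
  intro n _
  exact various_sum_agree n
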